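-- pv_equiv track=rewrite | github.com/halans/apple-flow | src/apple_flow/companion.py | _cross_channel_correlate
-- ===== SOURCE A (Python) =====
-- def _cross_channel_correlate(observations: list[str]) -> list[str]:
--     """Detect related items across channels and annotate them."""
--     if len(observations) < 2:
--         return observations
--
--     # Extract keywords (3+ char words) from each observation
--     keyword_map: dict[str, list[int]] = {}
--     for idx, obs in enumerate(observations):
--         words = set(
--             w.lower() for w in obs.split()
--             if len(w) >= 4 and w.isalpha()
--         )
--         # Skip very common words
--         words -= {"with", "from", "this", "that", "have", "been", "will", "your", "task", "item"}
--         for word in words: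
--             keyword_map.setdefault(word, []).append(idx)
--
--     # Find clusters (keywords appearing in 2+ observations)
--     clustered_indices: set[int] = set()
--     cluster_keywords: list[str] = []
--     for keyword, indices in keyword_map.items():
--         if len(indices) >= 2:
--             clustered_indices.update(indices)
--             cluster_keywords.append(keyword)
--
--     if not clustered_indices or not cluster_keywords:
--         return observations
--
--     # Annotate the first observation in the cluster with a cross-channel note
--     result = list(observations)
--     first_idx = min(clustered_indices)
--     related_count = len(clustered_indices) - 1
--     keywords_str = ", ".join(sorted(set(cluster_keywords))[:3])
--     result[first_idx] += f" [related to {related_count} other item(s) — keywords: {keywords_str}]"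
--     return result
-- ===== SOURCE B (Python) =====
-- from collections import Counter
--
--
-- def _cross_channel_correlate(observations: list[str]) -> list[str]:
--     """Detect related items across channels and annotate them."""
--     if len(observations) < 2:
--         return observations
--
--     stop = {"with", "from", "this", "that", "have", "been", "will", "your", "task", "item"}
--     # One keyword set per observation (same filtering as before)
--     keysets = [
--         {w.lower() for w in obs.split() if len(w) >= 4 and w.isalpha()} - stop
--         for obs in observations
--     ]
--
--     # Document frequency of each keyword across observations
--     df = Counter()
--     for ks in keysets:
--         df.update(ks)
--     cluster = {w for w, c in df.items() if c >= 2}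
--     if not cluster:
--         return observations
--
--     # Second pass: observations sharing any cluster keyword
--     clustered = [i for i, ks in enumerate(keysets) if ks & cluster]
--
--     result = list(observations)
--     related_count = len(clustered) - 1
--     keywords_str = ", ".join(sorted(cluster)[:3])
--     result[clustered[0]] += f" [related to {related_count} other item(s) — keywords: {keywords_str}]"
--     return result
-- ===== Notes on version B (the rewrite author's own statement) =====
-- stated objective: alternative
-- what changed: Replaces the inverted keyword->index-list map and index-union pass by per-observation keyword sets aggregated into a document-frequency Counter, with a second pass over the observations selecting those whose keyword set intersects the cluster keywords.
import Mathlib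
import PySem

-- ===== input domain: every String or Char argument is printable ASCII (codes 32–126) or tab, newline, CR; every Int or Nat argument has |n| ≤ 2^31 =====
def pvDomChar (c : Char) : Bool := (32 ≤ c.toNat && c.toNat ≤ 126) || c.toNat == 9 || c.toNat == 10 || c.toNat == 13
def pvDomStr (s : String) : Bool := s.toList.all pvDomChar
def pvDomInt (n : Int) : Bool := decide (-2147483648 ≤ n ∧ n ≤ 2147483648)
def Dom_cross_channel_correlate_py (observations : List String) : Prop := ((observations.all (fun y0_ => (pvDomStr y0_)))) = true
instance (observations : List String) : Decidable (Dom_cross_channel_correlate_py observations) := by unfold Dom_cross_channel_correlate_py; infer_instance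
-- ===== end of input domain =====

-- B replaces A's inverted keyword→index-list map and index-union pass by per-observation keyword
-- sets, a document-frequency counter, and a second pass over the observations (objective: alternative).

-- ===== PORT A =====
-- shared helper: the common-word set both Pythons skip
def pvStop : List String :=
  ["with", "from", "this", "that", "have", "been", "will", "your", "task", "item"]

-- shared helper: both Pythons build the same per-observation keyword set
-- set(w.lower() for w in obs.split() if len(w) >= 4 and w.isalpha()) - stopwords
def pvKw (obs : String) : PySem.Set String :=
  PySem.Set.diff
    (PySem.Set.ofList ((PySem.Str.split₀ obs).filterMap
      (fun w => if 4 ≤ PySem.Str.len w && PySem.Str.strIsalpha w then some (PySem.Str.lower w) else none)))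
    (PySem.Set.ofList pvStop)

-- keyword_map: for idx, obs: for word in words: keyword_map.setdefault(word, []).append(idx)
def pvKmapA (observations : List String) : PySem.Dict String (List Int) :=
  (PySem.List.enumerate observations).foldl
    (fun d p => (pvKw p.2).foldl (fun d w => d.modify w [] (fun l => l ++ [p.1])) d)
    PySem.Dict.empty

-- clustered_indices (a set) and cluster_keywords (a list), built in one loop over the items
def pvClA (observations : List String) : PySem.Set Int × List String :=
  (pvKmapA observations).items.foldl
    (fun s kv => if 2 ≤ kv.2.length then (PySem.Set.update s.1 kv.2, s.2 ++ [kv.1]) else s)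
    ((PySem.Set.empty : PySem.Set Int), ([] : List String))

def cross_channel_correlate_py (observations : List String) : List String :=
  if observations.length < 2 then observations else
  if (pvClA observations).1.isEmpty || (pvClA observations).2.isEmpty then observations else
  match PySem.List.min? (pvClA observations).1 (fun x => x) with
  | none => observations  -- unreachable: the guard above ensures cl.1 ≠ []
  | some first =>
    match PySem.List.pyGet? observations first with
    | none => observations  -- unreachable: first is one of the enumerate indices, always in range
    | some v =>
      -- result[first_idx] += …  (exact: first ≥ 0 and in range, so List.set is Python's item assignment)
      observations.set first.toNat
        (v ++ " [related to " ++ PySem.Int.toStr (((pvClA observations).1.length : Int) - 1) ++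
         " other item(s) — keywords: " ++
         PySem.Str.join ", "
           (PySem.List.slice (PySem.List.sorted (PySem.Set.ofList (pvClA observations).2) (fun x => x) false) none (some 3)) ++
         "]")

-- ===== PORT B =====
def pvKeysetsB (observations : List String) : List (PySem.Set String) :=
  observations.map pvKw

-- document frequency of each keyword (Counter updated with each keyword set)
def pvDfB (observations : List String) : PySem.Dict String Int :=
  (pvKeysetsB observations).foldl
    (fun d ks => ks.foldl (fun d w => d.modify w 0 (fun c => c + 1)) d) PySem.Dict.empty

def pvClusterB (observations : List String) : PySem.Set String :=
  PySem.Set.ofList (((pvDfB observations).items.filter (fun p => 2 ≤ p.2)).map Prod.fst)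

-- second pass: indices of the observations whose keyword set meets the cluster keywords
def pvClusteredB (observations : List String) : List Int :=
  ((PySem.List.enumerate (pvKeysetsB observations)).filter
    (fun p => !(PySem.Set.inter p.2 (pvClusterB observations)).isEmpty)).map Prod.fst

def cross_channel_correlate_py_alt (observations : List String) : List String :=
  if observations.length < 2 then observations else
  if (pvClusterB observations).isEmpty then observations else
  match pvClusteredB observations with
  | [] => observations  -- unreachable: cluster nonempty forces a clustered observation
  | i :: _ =>
    match PySem.List.pyGet? observations i with
    | none => observations  -- unreachable: i is one of the enumerate indices, always in range
    | some v =>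
      observations.set i.toNat
        (v ++ " [related to " ++ PySem.Int.toStr (((pvClusteredB observations).length : Int) - 1) ++
         " other item(s) — keywords: " ++
         PySem.Str.join ", " ((PySem.List.sorted (pvClusterB observations) (fun x => x) false).take 3) ++
         "]")

-- ===== PRECONDITION & SPEC =====
def Spec_cross_channel_correlate_py (observations : List String) (out : List String) : Prop := out = cross_channel_correlate_py_alt observations
instance (observations : List String) (out : List String) : Decidable (Spec_cross_channel_correlate_py observations out) := by unfold Spec_cross_channel_correlate_py; infer_instance

-- ===== CLAIM (what is proved, stated in full; the proofs are below) =====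
def Claim_equal_cross_channel_correlate_py : Prop := ∀ (observations : List String), Dom_cross_channel_correlate_py observations → Spec_cross_channel_correlate_py observations (cross_channel_correlate_py observations)

-- ===== LEMMAS AND PROOFS =====

-- the (keyword, index) pair stream both programs aggregate
def pvPairs (observations : List String) : List (String × Int) :=
  (PySem.List.enumerate observations).flatMap (fun p => (pvKw p.2).map (fun w => (w, p.1)))

theorem pv_enum_fst_bounds {α : Type} (xs : List α) (s : Int) :
    ∀ p ∈ PySem.List.enumerate xs s, s ≤ p.1 ∧ p.1 < s + xs.length := by
  induction xs generalizing s with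
  | nil => simp [PySem.List.enumerate_nil]
  | cons x t ih =>
    intro p hp
    rw [PySem.List.enumerate_cons] at hp
    rcases List.mem_cons.mp hp with rfl | hmem
    · simp
    · have := ih (s + 1) p hmem; simp at this ⊢; omega

theorem pv_enum_pairwise {α : Type} (xs : List α) (s : Int) :
    (PySem.List.enumerate xs s).Pairwise (fun p q => p.1 < q.1) := by
  induction xs generalizing s with
  | nil => simp [PySem.List.enumerate_nil]
  | cons x t ih =>
    rw [PySem.List.enumerate_cons]
    refine List.Pairwise.cons ?_ (ih (s + 1))
    intro q hq
    have := (pv_enum_fst_bounds t (s + 1) q hq).1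
    simp; omega

theorem pv_enum_map {α β : Type} (f : α → β) (xs : List α) (s : Int) :
    PySem.List.enumerate (xs.map f) s = (PySem.List.enumerate xs s).map (fun p => (p.1, f p.2)) := by
  induction xs generalizing s with
  | nil => simp [PySem.List.enumerate_nil]
  | cons x t ih => simp [PySem.List.enumerate_cons, ih]

theorem pv_enum_map_snd {α : Type} (xs : List α) (s : Int) :
    (PySem.List.enumerate xs s).map Prod.snd = xs := by
  induction xs generalizing s with
  | nil => simp [PySem.List.enumerate_nil]
  | cons x t ih => rw [PySem.List.enumerate_cons]; simp [ih]

-- A's keyword_map is the grouping fold over the flattened (word, idx) stream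
theorem pvKmapA_eq (observations : List String) :
    pvKmapA observations
      = (pvPairs observations).foldl (fun d q => d.modify q.1 [] (fun l => l ++ [q.2])) PySem.Dict.empty := by
  rw [pvPairs, List.foldl_flatMap]
  unfold pvKmapA
  congr 1
  funext d p
  rw [List.foldl_map]

theorem pvKmapA_getD (observations : List String) (k : String) :
    (pvKmapA observations).getD k []
      = ((pvPairs observations).filter (fun q => q.1 == k)).map (fun q => q.2) := by
  rw [pvKmapA_eq, PySem.Dict.getD_foldl_modify_append]
  simp [PySem.Dict.getD_empty]

theorem pvKmapA_keys (observations : List String) :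
    (pvKmapA observations).keys = PySem.Set.ofList ((pvPairs observations).map Prod.fst) := by
  rw [pvKmapA_eq, PySem.Dict.keys_foldl_modify_key (pvPairs observations) Prod.fst [] (fun _ q => fun l => l ++ [q.2])]
  simp [PySem.Dict.keys_empty, PySem.Set.update_nil_left]

theorem pvKmapA_keys_nodup (observations : List String) : (pvKmapA observations).keys.Nodup := by
  rw [pvKmapA_keys]; exact PySem.Set.nodup_ofList _

theorem pvPairs_fst (observations : List String) :
    (pvPairs observations).map Prod.fst = observations.flatMap pvKw := by
  rw [pvPairs, List.map_flatMap]
  have h1 : ∀ p : Int × String, ((pvKw p.2).map (fun w => (w, p.1))).map Prod.fst = pvKw p.2 := by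
    intro p; simp [Function.comp_def]
  calc (PySem.List.enumerate observations).flatMap (fun p => ((pvKw p.2).map (fun w => (w, p.1))).map Prod.fst)
      = (PySem.List.enumerate observations).flatMap (fun p => pvKw p.2) := by
        apply List.flatMap_congr; intro p _; exact h1 p
    _ = ((PySem.List.enumerate observations).map Prod.snd).flatMap pvKw := by rw [List.flatMap_map]
    _ = observations.flatMap pvKw := by rw [pv_enum_map_snd]

theorem pvDfB_eq (observations : List String) :
    pvDfB observations
      = ((pvPairs observations).map Prod.fst).foldl (fun d w => d.modify w 0 (fun c => c + 1)) PySem.Dict.empty := by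
  rw [pvPairs_fst, pvDfB, pvKeysetsB, List.foldl_map, List.foldl_flatMap]

-- A's cluster loop, split into its two accumulators
theorem pvClA_eq (observations : List String) :
    pvClA observations
      = (PySem.Set.ofList (((pvKmapA observations).items.filter (fun kv => decide (2 ≤ kv.2.length))).flatMap (fun kv => kv.2)),
         ((pvKmapA observations).items.filter (fun kv => decide (2 ≤ kv.2.length))).map Prod.fst) := by
  unfold pvClA
  generalize (pvKmapA observations).items = items
  have hcongr : items.foldl
      (fun s kv => if 2 ≤ kv.2.length then (PySem.Set.update s.1 kv.2, s.2 ++ [kv.1]) else s)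
      ((PySem.Set.empty : PySem.Set Int), ([] : List String))
    = items.foldl
      (fun s kv => ((if 2 ≤ kv.2.length then PySem.Set.update s.1 kv.2 else s.1),
                    (if 2 ≤ kv.2.length then s.2 ++ [kv.1] else s.2)))
      ((PySem.Set.empty : PySem.Set Int), ([] : List String)) := by
    apply PySem.List.foldl_congr_mem
    intro acc kv _
    by_cases h : 2 ≤ kv.2.length <;> simp [h]
  rw [hcongr]
  have h2 := PySem.List.foldl_prod_mk
      (f := fun (s1 : PySem.Set Int) (kv : String × List Int) => if 2 ≤ kv.2.length then PySem.Set.update s1 kv.2 else s1)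
      (g := fun (s2 : List String) (kv : String × List Int) => if 2 ≤ kv.2.length then s2 ++ [kv.1] else s2)
      items PySem.Set.empty []
  simp only at h2
  rw [h2]
  clear hcongr h2
  simp only [Prod.mk.injEq]
  refine ⟨?_, ?_⟩
  · have h3 := PySem.List.foldl_ite_eq_foldl_filter (p := fun (kv : String × List Int) => 2 ≤ kv.2.length)
      (f := fun (s1 : PySem.Set Int) kv => PySem.Set.update s1 kv.2) items PySem.Set.empty
    simp only at h3
    rw [h3, PySem.Set.ofList_eq_foldl, List.foldl_flatMap]
    show _ = List.foldl _ (PySem.Set.empty) _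
    apply PySem.List.foldl_congr_mem
    intro acc kv _
    exact PySem.Set.update_eq_foldl acc kv.2
  · have h4 := PySem.List.foldl_append_ite (p := fun (kv : String × List Int) => 2 ≤ kv.2.length) (f := Prod.fst)
      items []
    simpa using h4

-- B's document-frequency counter counts the same stream
theorem pvDfB_getD (observations : List String) (k : String) :
    (pvDfB observations).getD k 0 = (((pvPairs observations).map Prod.fst).count k : Int) := by
  rw [pvDfB_eq, PySem.Dict.getD_foldl_modify_add_one]
  simp [PySem.Dict.getD_empty]

theorem pvDfB_keys (observations : List String) :
    (pvDfB observations).keys = (pvKmapA observations).keys := by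
  rw [pvKmapA_keys, pvDfB_eq]
  have h := PySem.Dict.keys_foldl_modify_key ((pvPairs observations).map Prod.fst) (fun w => w) ((0 : Int))
      (fun _ _ => fun c => c + 1) PySem.Dict.empty
  simp only at h
  refine Eq.trans ?_ (h.trans ?_)
  · rfl
  · simp [PySem.Dict.keys_empty, PySem.Set.update_nil_left, Function.comp_def]

theorem pvDfB_keys_nodup (observations : List String) : (pvDfB observations).keys.Nodup := by
  rw [pvDfB_keys]; exact pvKmapA_keys_nodup observations

theorem pv_count_filter (l : List (String × Int)) (k : String) :
    (l.filter (fun q => q.1 == k)).length = (l.map Prod.fst).count k := by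
  rw [List.count_eq_countP, List.countP_map, ← List.countP_eq_length_filter]
  rfl

-- both cluster-keyword collections are this filter of the common key list
theorem pvClA_snd_eq (observations : List String) :
    (pvClA observations).2
      = (pvKmapA observations).keys.filter
          (fun k => decide (2 ≤ ((pvKmapA observations).getD k []).length)) := by
  rw [pvClA_eq]
  simp only
  rw [PySem.Dict.items_eq_map_keys (pvKmapA observations) (pvKmapA_keys_nodup observations) []]
  rw [List.filter_map, List.map_map]
  simp [Function.comp_def]

theorem pvClA_snd_nodup (observations : List String) : (pvClA observations).2.Nodup := by
  rw [pvClA_snd_eq]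
  exact (pvKmapA_keys_nodup observations).filter _

-- the cluster keywords coincide, as lists
theorem pvCluster_eq (observations : List String) :
    pvClusterB observations = (pvClA observations).2 := by
  unfold pvClusterB
  rw [PySem.Dict.items_eq_map_keys (pvDfB observations) (pvDfB_keys_nodup observations) 0]
  rw [List.filter_map, List.map_map]
  simp only [Function.comp_def]
  rw [pvDfB_keys, pvClA_snd_eq]
  have hfc : ∀ k ∈ (pvKmapA observations).keys,
      (decide (2 ≤ (pvDfB observations).getD k 0))
        = (decide (2 ≤ ((pvKmapA observations).getD k []).length)) := by
    intro k _
    rw [pvDfB_getD, pvKmapA_getD]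
    simp only [List.length_map, pv_count_filter]
    by_cases h : 2 ≤ ((pvPairs observations).map Prod.fst).count k
    · simp only [decide_eq_decide]
      constructor <;> intro <;> [exact h; exact_mod_cast h]
    · simp only [decide_eq_decide]
      constructor <;> intro h2
      · exact absurd (by exact_mod_cast h2) h
      · exact absurd h2 h
  rw [List.filter_congr hfc]
  simp only [List.map_id']
  exact PySem.Set.ofList_eq_self_of_nodup _ ((pvKmapA_keys_nodup observations).filter _)

theorem pv_mem_getD (observations : List String) (k : String) (i : Int) :
    i ∈ (pvKmapA observations).getD k [] ↔ (k, i) ∈ pvPairs observations := by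
  rw [pvKmapA_getD]
  simp only [List.mem_map, List.mem_filter]
  constructor
  · rintro ⟨q, ⟨hq, hq1⟩, rfl⟩
    obtain ⟨q1, q2⟩ := q
    have : q1 = k := by simpa using hq1
    subst this; exact hq
  · intro h; exact ⟨(k, i), ⟨h, by simp⟩, rfl⟩

theorem pv_mem_pairs (observations : List String) (k : String) (i : Int) :
    (k, i) ∈ pvPairs observations
      ↔ ∃ p ∈ PySem.List.enumerate observations 0, p.1 = i ∧ k ∈ pvKw p.2 := by
  unfold pvPairs
  simp only [List.mem_flatMap, List.mem_map, Prod.mk.injEq]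
  constructor
  · rintro ⟨p, hp, w, hw, rfl, rfl⟩; exact ⟨p, hp, rfl, hw⟩
  · rintro ⟨p, hp, rfl, hw⟩; exact ⟨p, hp, k, hw, rfl, rfl⟩

theorem pvClA_fst_mem (observations : List String) (i : Int) :
    i ∈ (pvClA observations).1 ↔ ∃ k ∈ (pvClA observations).2, i ∈ (pvKmapA observations).getD k [] := by
  conv_lhs => rw [pvClA_eq]
  rw [pvClA_snd_eq]
  simp only [PySem.Set.mem_ofList, List.mem_flatMap]
  rw [PySem.Dict.items_eq_map_keys (pvKmapA observations) (pvKmapA_keys_nodup observations) [],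
    List.filter_map]
  constructor
  · rintro ⟨kv, hkv, hi⟩
    rw [List.mem_map] at hkv
    obtain ⟨k, hk, rfl⟩ := hkv
    have hk2 := List.mem_filter.mp hk
    exact ⟨k, List.mem_filter.mpr ⟨hk2.1, hk2.2⟩, hi⟩
  · rintro ⟨k, hk, hi⟩
    have hk2 := List.mem_filter.mp hk
    refine ⟨(k, (pvKmapA observations).getD k []), ?_, hi⟩
    rw [List.mem_map]
    exact ⟨k, List.mem_filter.mpr ⟨hk2.1, hk2.2⟩, rfl⟩

theorem pvClusteredB_eq (observations : List String) :
    pvClusteredB observations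
      = ((PySem.List.enumerate observations).filter
          (fun p => !(PySem.Set.inter (pvKw p.2) (pvClusterB observations)).isEmpty)).map Prod.fst := by
  unfold pvClusteredB pvKeysetsB
  rw [pv_enum_map, List.filter_map, List.map_map]
  simp [Function.comp_def]

-- the clustered index collections have the same members
theorem pvClustered_mem (observations : List String) (i : Int) :
    i ∈ (pvClA observations).1 ↔ i ∈ pvClusteredB observations := by
  rw [pvClA_fst_mem, pvClusteredB_eq]
  simp only [List.mem_map, List.mem_filter, Bool.not_eq_eq_eq_not, Bool.not_true,
    List.isEmpty_eq_false_iff_exists_mem]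
  constructor
  · rintro ⟨k, hk, hi⟩
    rw [pv_mem_getD, pv_mem_pairs] at hi
    obtain ⟨p, hp, rfl, hkw⟩ := hi
    refine ⟨p, ⟨hp, ⟨k, ?_⟩⟩, rfl⟩
    rw [PySem.Set.mem_inter]
    exact ⟨hkw, by rw [pvCluster_eq]; exact hk⟩
  · rintro ⟨p, ⟨hp, ⟨k, hk⟩⟩, rfl⟩
    rw [PySem.Set.mem_inter, pvCluster_eq] at hk
    refine ⟨k, hk.2, ?_⟩
    rw [pv_mem_getD, pv_mem_pairs]
    exact ⟨p, hp, rfl, hk.1⟩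

theorem pvClustered_pairwise (observations : List String) :
    (pvClusteredB observations).Pairwise (· < ·) := by
  rw [pvClusteredB_eq]
  rw [List.pairwise_map]
  exact List.Pairwise.sublist (List.filter_sublist) (pv_enum_pairwise observations 0)

theorem pvClA_fst_nodup (observations : List String) : (pvClA observations).1.Nodup := by
  rw [pvClA_eq]
  exact PySem.Set.nodup_ofList _

theorem pvClA_fst_nil_iff (observations : List String) :
    (pvClA observations).1 = [] ↔ (pvClA observations).2 = [] := by
  constructor
  · intro h1
    by_contra h2
    obtain ⟨k, hk⟩ := List.exists_mem_of_ne_nil _ h2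
    have hk' := (pvClA_snd_eq observations) ▸ hk
    have hlen := (List.mem_filter.mp hk').2
    simp only [decide_eq_true_eq] at hlen
    obtain ⟨i, hi⟩ := List.exists_mem_of_length_pos (l := (pvKmapA observations).getD k []) (by omega)
    have : i ∈ (pvClA observations).1 := (pvClA_fst_mem observations i).mpr ⟨k, hk, hi⟩
    rw [h1] at this
    exact absurd this (List.not_mem_nil)
  · intro h2
    have : ((pvKmapA observations).items.filter (fun kv => decide (2 ≤ kv.2.length))) = [] := by
      have := pvClA_eq observations
      have hsnd : (pvClA observations).2 = _ := congrArg Prod.snd this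
      simp only at hsnd
      rw [h2] at hsnd
      exact List.map_eq_nil_iff.mp hsnd.symm
    have hfst : (pvClA observations).1 = _ := congrArg Prod.fst (pvClA_eq observations)
    simp only at hfst
    rw [this] at hfst
    simpa using hfst

theorem pv_main (observations : List String) :
    cross_channel_correlate_py observations = cross_channel_correlate_py_alt observations := by
  unfold cross_channel_correlate_py cross_channel_correlate_py_alt
  by_cases hlen : observations.length < 2
  · simp [hlen]
  · simp only [if_neg hlen]
    by_cases hsnd : (pvClA observations).2 = []
    · have h1 : (pvClA observations).1 = [] := (pvClA_fst_nil_iff observations).mpr hsnd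
      have hcl : pvClusterB observations = [] := by rw [pvCluster_eq]; exact hsnd
      simp [h1, hsnd, hcl]
    · have h1 : (pvClA observations).1 ≠ [] := fun h => hsnd ((pvClA_fst_nil_iff observations).mp h)
      have hclB : pvClusterB observations ≠ [] := by rw [pvCluster_eq]; exact hsnd
      have hA : ((pvClA observations).1.isEmpty || (pvClA observations).2.isEmpty) = false := by
        simp [h1, hsnd]
      have hB : (pvClusterB observations).isEmpty = false := by simp [hclB]
      simp only [hA, hB, Bool.false_eq_true, if_false]
      have hclust_ne : pvClusteredB observations ≠ [] := by
        obtain ⟨j, hj⟩ := List.exists_mem_of_ne_nil _ h1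
        exact List.ne_nil_of_mem ((pvClustered_mem observations j).mp hj)
      obtain ⟨i, rest, hcl⟩ := List.exists_cons_of_ne_nil hclust_ne
      obtain ⟨m, hm⟩ : ∃ m, PySem.List.min? (pvClA observations).1 (fun x => x) = some m := by
        cases h : PySem.List.min? (pvClA observations).1 (fun x => x) with
        | none => exact absurd ((PySem.List.min?_eq_none_iff _ _).mp h) h1
        | some m => exact ⟨m, rfl⟩
      have hmem_m : m ∈ pvClusteredB observations :=
        (pvClustered_mem observations m).mp (PySem.List.min?_mem hm)
      have hi_mem : i ∈ pvClusteredB observations := by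
        rw [hcl]; exact List.mem_cons_self
      have hle : m ≤ i := PySem.List.min?_isMin hm i ((pvClustered_mem observations i).mpr hi_mem)
      have hpw := pvClustered_pairwise observations
      rw [hcl] at hpw hmem_m
      have hge : i ≤ m := by
        rcases List.mem_cons.mp hmem_m with rfl | hr
        · exact le_refl _
        · exact le_of_lt ((List.pairwise_cons.mp hpw).1 m hr)
      have hmi : m = i := le_antisymm hle hge
      subst hmi
      have hnodupB : (pvClusteredB observations).Nodup :=
        List.Pairwise.imp (fun h => ne_of_lt h) (pvClustered_pairwise observations)
      have hlen2 : (pvClA observations).1.length = (pvClusteredB observations).length := by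
        have hperm : (pvClA observations).1.Perm (pvClusteredB observations) :=
          (List.perm_ext_iff_of_nodup (pvClA_fst_nodup observations) hnodupB).mpr
            (fun a => pvClustered_mem observations a)
        exact hperm.length_eq
      have hkw : PySem.List.slice
            (PySem.List.sorted (PySem.Set.ofList (pvClA observations).2) (fun x => x) false) none (some 3)
          = (PySem.List.sorted (pvClusterB observations) (fun x => x) false).take 3 := by
        rw [PySem.Set.ofList_eq_self_of_nodup _ (pvClA_snd_nodup observations), pvCluster_eq]
        rw [PySem.List.slice_to _ (by norm_num)]
        rfl
      rw [hm, hkw, hlen2, hcl]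

-- ===== VERDICT (by name: the statement is the Claim_ definition above) =====
theorem cross_channel_correlate_py_spec : Claim_equal_cross_channel_correlate_py := by
  intro observations _
  exact pv_main observations
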